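-- pv_equiv track=rewrite | github.com/ccarmonar/memoria_utfsm_sparql | Scripts/test.py | CleanOperators
-- ===== SOURCE A (Python) =====
-- def CleanOperators(operators):
-- 	remove_list = []
-- 	for k in operators:
-- 		if operators[k]['profile_text'] == '':
-- 			remove_list.append(k)
-- 	for k in remove_list:
-- 		operators.pop(k)
-- 	return operators
-- ===== SOURCE B (Python) =====
-- def CleanOperators(operators):
--     # Destructively empty the dict from the back with popitem(), keeping the
--     # entries whose profile_text is non-empty on an explicit stack, then push
--     # them back (stack order restores the original key order). Same object,
--     # same final contents as A.
--     stack = []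
--     while operators:
--         k, v = operators.popitem()
--         if v['profile_text'] != '':
--             stack.append((k, v))
--     while stack:
--         k, v = stack.pop()
--         operators[k] = v
--     return operators
-- ===== Notes on version B (the rewrite author's own statement) =====
-- stated objective: alternative
-- what changed: Instead of scanning forward to collect the keys to delete and popping each, B destructively drains the dict back-to-front with popitem(), keeps the surviving (key,value) pairs on an explicit stack, and then pushes them back one by one, restoring the original order.
-- outside the precondition, e.g. on CleanOperators({'a': {'x': 'y'}}): A raises KeyError, B raises KeyError
import Mathlib
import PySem

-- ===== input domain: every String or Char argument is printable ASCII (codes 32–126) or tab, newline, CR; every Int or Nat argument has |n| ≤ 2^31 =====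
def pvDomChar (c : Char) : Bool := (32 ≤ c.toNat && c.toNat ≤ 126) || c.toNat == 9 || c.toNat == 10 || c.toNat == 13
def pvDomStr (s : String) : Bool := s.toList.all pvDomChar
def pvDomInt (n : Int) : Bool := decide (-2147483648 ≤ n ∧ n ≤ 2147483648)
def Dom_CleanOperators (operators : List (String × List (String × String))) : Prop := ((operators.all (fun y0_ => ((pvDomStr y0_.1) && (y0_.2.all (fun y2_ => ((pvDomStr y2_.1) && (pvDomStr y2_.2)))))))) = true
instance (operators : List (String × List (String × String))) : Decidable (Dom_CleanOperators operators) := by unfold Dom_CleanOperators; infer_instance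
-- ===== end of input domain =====

-- B drains the dict back-to-front with popitem() onto an explicit stack of survivors and
-- pushes them back, instead of A's forward collect-keys-then-pop-each; same cost.
-- The equivalence proved is about the RETURN value; both Pythons mutate the argument dict
-- to the same final contents.

-- ===== PORT A =====
-- for k in operators: if operators[k]['profile_text'] == '': remove_list.append(k)
-- then: for k in remove_list: operators.pop(k)   (pop = remove the first entry with that key)
def CleanOperators (operators : List (String × List (String × String))) : List (String × List (String × String)) :=
  let removeList : List String :=
    operators.foldl (fun acc kv =>
      match List.lookup kv.1 operators with      -- operators[k]
      | some v =>
        match List.lookup "profile_text" v with  -- v['profile_text']  (KeyError → none, excluded by Pre_)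
        | some t => if t = "" then acc ++ [kv.1] else acc
        | none => acc
      | none => acc) []
  removeList.foldl (fun d k => d.eraseP (fun kv => kv.1 == k)) operators

-- ===== PORT B =====
-- operators[k] = v  on a dict: overwrite in place if the key exists, else append
def pyAssign (d : List (String × List (String × String))) (k : String) (v : List (String × String)) : List (String × List (String × String)) :=
  if d.any (fun kv => kv.1 == k) then d.map (fun kv => if kv.1 == k then (k, v) else kv)
  else d ++ [(k, v)]

-- while operators: k, v = operators.popitem(); if v['profile_text'] != '': stack.append((k, v))
-- popitem removes the LAST item, so the loop walks operators.reverse in order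
def popPhase : List (String × List (String × String)) → List (String × List (String × String)) → List (String × List (String × String))
  | [], stack => stack
  | kv :: rest, stack =>
    match List.lookup "profile_text" kv.2 with   -- KeyError → none, excluded by Pre_
    | some t => if t ≠ "" then popPhase rest (stack ++ [kv]) else popPhase rest stack
    | none => popPhase rest stack

-- while stack: k, v = stack.pop(); operators[k] = v   (pop takes the LAST element)
def pushPhase (stack : List (String × List (String × String))) : List (String × List (String × String)) :=
  stack.reverse.foldl (fun d kv => pyAssign d kv.1 kv.2) []

def CleanOperators_alt (operators : List (String × List (String × String))) : List (String × List (String × String)) :=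
  pushPhase (popPhase operators.reverse [])

-- ===== PRECONDITION & SPEC =====
-- Pre_ excludes (a) dicts where some value lacks the 'profile_text' key — there both Pythons
-- raise KeyError — and (b) duplicate top-level keys, which a real Python dict cannot contain
-- (only the association-list encoding can).
def Pre_CleanOperators (operators : List (String × List (String × String))) : Prop :=
  (operators.map (·.1)).Nodup ∧ ∀ kv ∈ operators, (List.lookup "profile_text" kv.2).isSome
instance (operators : List (String × List (String × String))) : Decidable (Pre_CleanOperators operators) := by unfold Pre_CleanOperators; infer_instance

def pvWitness_CleanOperators : (List (String × List (String × String))) :=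
  [("a", [("profile_text", "x")]), ("b", [("profile_text", "")])]

def Spec_CleanOperators (operators : List (String × List (String × String))) (out : List (String × List (String × String))) : Prop := out = CleanOperators_alt operators
instance (operators : List (String × List (String × String))) (out : List (String × List (String × String))) : Decidable (Spec_CleanOperators operators out) := by unfold Spec_CleanOperators; infer_instance

-- ===== CLAIM (what is proved, stated in full; the proofs are below) =====
def Claim_equal_CleanOperators : Prop := ∀ (operators : List (String × List (String × String))), Dom_CleanOperators operators → Pre_CleanOperators operators → Spec_CleanOperators operators (CleanOperators operators)

-- ===== LEMMAS AND PROOFS =====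

-- the Bool predicates 'removed by A' and 'kept by B'
def pvRem (kv : String × List (String × String)) : Bool :=
  List.lookup "profile_text" kv.2 == some ""

def pvKeep (kv : String × List (String × String)) : Bool :=
  match List.lookup "profile_text" kv.2 with
  | some t => t ≠ ""
  | none => false

-- nodup keys: lookup of a member's key returns that member's value
theorem lookup_self : ∀ (l : List (String × List (String × String))), (l.map (·.1)).Nodup →
    ∀ kv ∈ l, List.lookup kv.1 l = some kv.2 := by
  intro l
  induction l with
  | nil => intro _ kv h; cases h
  | cons hd tl ih =>
    intro hnd kv hkv
    simp only [List.map_cons, List.nodup_cons] at hnd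
    rcases List.mem_cons.1 hkv with h | h
    · subst h; simp [List.lookup]
    · have hne : (kv.1 == hd.1) = false := by
        simp only [beq_eq_false_iff_ne, ne_eq]
        intro he
        exact hnd.1 (he ▸ List.mem_map_of_mem h)
      simp only [List.lookup, hne]
      exact ih hnd.2 kv h

-- Phase 1 of A: under nodup keys the collected remove list is the keys of the entries with empty profile_text
theorem removeList_eq (ops : List (String × List (String × String))) :
    ∀ (l : List (String × List (String × String))) (acc : List String),
      (∀ kv ∈ l, List.lookup kv.1 ops = some kv.2) →
      l.foldl (fun acc kv =>
        match List.lookup kv.1 ops with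
        | some v =>
          match List.lookup "profile_text" v with
          | some t => if t = "" then acc ++ [kv.1] else acc
          | none => acc
        | none => acc) acc = acc ++ (l.filter pvRem).map (·.1) := by
  intro l
  induction l with
  | nil => intro acc _; simp
  | cons kv tl ih =>
    intro acc h
    have hkv : List.lookup kv.1 ops = some kv.2 := h kv (by simp)
    have htl : ∀ x ∈ tl, List.lookup x.1 ops = some x.2 := fun x hx => h x (by simp [hx])
    simp only [List.foldl_cons, hkv, List.filter_cons]
    cases hl : List.lookup "profile_text" kv.2 with
    | none => simp [ih _ htl, pvRem, hl]
    | some t =>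
      by_cases ht : t = "" <;>
        simp [ih _ htl, pvRem, hl, ht]

-- erasing one key from a nodup-key assoc list is a filter
theorem eraseP_eq_filter (k : String) :
    ∀ (d : List (String × List (String × String))), (d.map (·.1)).Nodup →
      d.eraseP (fun kv => kv.1 == k) = d.filter (fun kv => kv.1 != k) := by
  intro d
  induction d with
  | nil => intro _; rfl
  | cons kv tl ih =>
    intro hnd
    simp only [List.map_cons, List.nodup_cons] at hnd
    by_cases hk : kv.1 = k
    · have : tl.filter (fun kv => kv.1 != k) = tl := by
        apply List.filter_eq_self.2
        intro x hx
        simp only [bne_iff_ne, ne_eq]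
        intro hxk
        exact hnd.1 (by rw [hk, ← hxk]; exact List.mem_map_of_mem hx)
      simp [hk, this]
    · simp [hk, ih hnd.2]

-- Phase 2 of A: popping each key of ks is one filter
theorem foldl_erase_eq_filter :
    ∀ (ks : List String) (d : List (String × List (String × String))), (d.map (·.1)).Nodup →
      ks.foldl (fun d k => d.eraseP (fun kv => kv.1 == k)) d
        = d.filter (fun kv => !ks.contains kv.1) := by
  intro ks
  induction ks with
  | nil => intro d _; simp
  | cons k tl ih =>
    intro d hnd
    have hnd' : ((d.filter (fun kv => kv.1 != k)).map (·.1)).Nodup :=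
      hnd.sublist (List.Sublist.map _ List.filter_sublist)
    simp only [List.foldl_cons, eraseP_eq_filter k d hnd, ih _ hnd', List.filter_filter]
    apply List.filter_congr
    intro kv _
    by_cases h : kv.1 = k
    · simp [h]
    · simp [h]

-- A's result, under Pre_, is the keep-filter
theorem a_eq_filter (ops : List (String × List (String × String)))
    (hnd : (ops.map (·.1)).Nodup)
    (hkey : ∀ kv ∈ ops, (List.lookup "profile_text" kv.2).isSome) :
    CleanOperators ops = ops.filter pvKeep := by
  unfold CleanOperators
  have hself : ∀ kv ∈ ops, List.lookup kv.1 ops = some kv.2 := lookup_self ops hnd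
  rw [removeList_eq ops ops [] hself, List.nil_append,
      foldl_erase_eq_filter _ ops hnd]
  apply List.filter_congr
  intro kv hkv
  have hmem : kv.1 ∈ ((ops.filter pvRem).map (·.1)) ↔ pvRem kv := by
    constructor
    · intro h
      rcases List.mem_map.1 h with ⟨kv', hkv', he⟩
      rcases List.mem_filter.1 hkv' with ⟨hkv'm, hp⟩
      have : kv' = kv := List.inj_on_of_nodup_map hnd hkv'm hkv he
      rwa [← this]
    · intro h
      exact List.mem_map_of_mem (List.mem_filter.2 ⟨hkv, h⟩)
  cases hl : List.lookup "profile_text" kv.2 with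
  | none =>
    have := hkey kv hkv
    rw [hl] at this
    simp at this
  | some t =>
    by_cases ht : t = "" <;>
      simp [hmem, pvKeep, pvRem, hl, ht]

-- Phase 1 of B: the stack collects the kept entries in traversal order
theorem popPhase_eq : ∀ (l stack : List (String × List (String × String))),
    popPhase l stack = stack ++ l.filter pvKeep := by
  intro l
  induction l with
  | nil => intro stack; simp [popPhase]
  | cons kv rest ih =>
    intro stack
    simp only [popPhase, List.filter_cons]
    cases hl : List.lookup "profile_text" kv.2 with
    | none => simp [ih, pvKeep, hl]
    | some t =>
      by_cases ht : t = "" <;> simp [ih, pvKeep, hl, ht]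

-- Phase 2 of B: assigning pairwise-distinct fresh keys into a dict appends them
theorem foldl_pyAssign : ∀ (l d : List (String × List (String × String))),
    (l.map (·.1)).Nodup → (∀ kv ∈ l, ∀ kv' ∈ d, kv.1 ≠ kv'.1) →
    l.foldl (fun d kv => pyAssign d kv.1 kv.2) d = d ++ l := by
  intro l
  induction l with
  | nil => intro d _ _; simp
  | cons kv rest ih =>
    intro d hnd hdisj
    simp only [List.map_cons, List.nodup_cons] at hnd
    have hfresh : (d.any (fun kv' => kv'.1 == kv.1)) = false := by
      simp only [List.any_eq_false, beq_iff_eq]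
      intro kv' hkv'
      exact fun he => hdisj kv (by simp) kv' hkv' he.symm
    have hdisj' : ∀ x ∈ rest, ∀ kv' ∈ d ++ [(kv.1, kv.2)], x.1 ≠ kv'.1 := by
      intro x hx kv' hkv'
      rcases List.mem_append.1 hkv' with h | h
      · exact hdisj x (by simp [hx]) kv' h
      · simp only [List.mem_singleton] at h
        subst h
        intro he
        exact hnd.1 (he ▸ List.mem_map_of_mem hx)
    have hstep : pyAssign d kv.1 kv.2 = d ++ [(kv.1, kv.2)] := by
      simp [pyAssign, hfresh]
    rw [List.foldl_cons, hstep, ih (d ++ [(kv.1, kv.2)]) hnd.2 hdisj']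
    simp

-- B's result, under nodup keys, is the same keep-filter
theorem b_eq_filter (ops : List (String × List (String × String)))
    (hnd : (ops.map (·.1)).Nodup) :
    CleanOperators_alt ops = ops.filter pvKeep := by
  unfold CleanOperators_alt pushPhase
  rw [popPhase_eq, List.nil_append, List.filter_reverse, List.reverse_reverse]
  have hnd' : ((ops.filter pvKeep).map (·.1)).Nodup :=
    hnd.sublist (List.Sublist.map _ List.filter_sublist)
  rw [foldl_pyAssign (ops.filter pvKeep) [] hnd' (by intro kv _ kv' h; cases h)]
  simp

-- ===== VERDICT (by name: the statement is the Claim_ definition above) =====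
theorem CleanOperators_spec : Claim_equal_CleanOperators := by
  intro ops _ hpre
  obtain ⟨hnd, hkey⟩ := hpre
  unfold Spec_CleanOperators
  rw [a_eq_filter ops hnd hkey, b_eq_filter ops hnd]
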